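-- pv_equiv track=rewrite | github.com/tofarr/servey | servey/json_params.py | _get_raw_tokens
-- ===== SOURCE A (Python) =====
-- from typing import Dict, List, Union, Iterator, Tuple
--
-- def _get_raw_tokens(key: str) -> Iterator[Tuple[str, bool]]:
--     prev_index = 0
--     index = 0
--     while index < len(key):
--         if key[index] == '.':
--             if not _is_escaped(key, index):
--                 token = key[prev_index:index]
--                 yield token, False
--                 prev_index = index + 1
--             else:
--                 key = key[:index-1] + key[index:]
--         index += 1
--     token = key[prev_index:index]
--     yield token, True
--
-- def _is_escaped(key: str, index: int) -> bool:
--     count = _count_preceding_tildas(key, index)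
--     escaped = count & 1 == 1
--     return escaped
--
-- def _count_preceding_tildas(key: str, index: int) -> int:
--     count = 0
--     while index > 0:
--         index -= 1
--         if key[index] != '~':
--             return count
--         count += 1
--     return count
-- ===== SOURCE B (Python) =====
-- def _get_raw_tokens(key):
--     parts = key.split('.')
--     current = parts[0]
--     for part in parts[1:]:
--         n = len(current) - len(current.rstrip('~'))
--         if n & 1:
--             current = current[:-1] + '.' + part
--         else:
--             yield current, False
--             current = part
--     yield current, True
-- ===== Notes on version B (the rewrite author's own statement) =====
-- stated objective: faster
-- what changed: B splits the key on every dot up front (str.split) and folds over the pieces, re-joining a piece when the accumulated token ends in an odd run of tildes, instead of A's per-character index loop that rescans tildes backwards and deletes characters from the string in place.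
-- intended difference: On keys containing an escaped dot immediately followed by another dot (substring '~..' with an odd tilde run), A's index skips the second dot after deleting the tilde and returns it as a literal inside a merged token (e.g. 'a~..b' -> [('a..b', True)]), while B treats it as the separator it is ('a~..b' -> [('a.', False), ('b', True)]), which is the intended escaping semantics. — e.g. on _get_raw_tokens("a~..b"): A returns [("a..b", true)], B returns [("a.", false), ("b", true)]
import Mathlib
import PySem

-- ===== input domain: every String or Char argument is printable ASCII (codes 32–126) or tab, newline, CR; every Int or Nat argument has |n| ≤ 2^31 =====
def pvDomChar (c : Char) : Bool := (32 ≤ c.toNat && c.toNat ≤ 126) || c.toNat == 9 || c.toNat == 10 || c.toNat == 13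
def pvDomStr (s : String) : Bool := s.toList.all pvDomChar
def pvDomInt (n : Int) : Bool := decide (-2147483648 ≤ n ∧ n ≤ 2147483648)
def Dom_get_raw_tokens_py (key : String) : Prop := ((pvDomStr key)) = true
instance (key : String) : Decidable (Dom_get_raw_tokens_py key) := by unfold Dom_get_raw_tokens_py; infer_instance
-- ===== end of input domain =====

-- B replaces A's index loop with in-place tilde deletion by an up-front split on '.'
-- followed by a left fold that re-joins pieces after an odd trailing-tilde run (objective: simpler).
-- On keys containing an escaped dot immediately followed by another dot A skips that second dot
-- (returns it literally inside a merged token); B treats it as a separator — see D_ below.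

-- ===== PORT A =====
-- _count_preceding_tildas: walk backwards from index counting '~' until a non-'~' (or position 0).
def pvCountTildas (key : List Char) : Nat → Nat
  | 0 => 0
  | i + 1 => if key.getD i ' ' ≠ '~' then 0 else pvCountTildas key i + 1

-- _is_escaped
def pvIsEscaped (key : List Char) (index : Nat) : Bool :=
  pvCountTildas key index % 2 == 1

-- the while loop of _get_raw_tokens: key is edited in place on an escaped dot.
-- fuel is only a structural totality guard: the loop runs at most key.length + 1 times
-- (index grows by 1 each iteration and key never grows), so fuel never reaches 0.
def pvALoop : Nat → List Char → Nat → Nat → List (String × Bool)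
  | 0, _, _, _ => []
  | fuel + 1, key, prev, index =>
    if index < key.length then
      if key.getD index ' ' = '.' then
        if pvIsEscaped key index = false then
          (String.ofList ((key.drop prev).take (index - prev)), false)
            :: pvALoop fuel key (index + 1) (index + 1)
        else
          pvALoop fuel (key.take (index - 1) ++ key.drop index) prev (index + 1)
      else pvALoop fuel key prev (index + 1)
    else
      [(String.ofList (key.drop prev), true)]

def get_raw_tokens_py (key : String) : List (String × Bool) :=
  pvALoop (key.toList.length + 1) key.toList 0 0

-- ===== PORT B =====
-- len(current) - len(current.rstrip('~')) : the number of trailing tildes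
def pvTrailTildas (cur : List Char) : Nat :=
  (cur.reverse.takeWhile (fun c => c = '~')).length

-- key.split('.') — hand-written port of str.split, exact for the one-char separator '.'
def pvSplitDot : List Char → List (List Char)
  | [] => [[]]
  | c :: rest =>
    if c = '.' then [] :: pvSplitDot rest
    else
      match pvSplitDot rest with
      | [] => [[c]]
      | h :: t => (c :: h) :: t

-- the body of Source B's for loop, with the yielded pairs accumulated on the left
def pvBStep : (List (String × Bool) × List Char) → List Char → (List (String × Bool) × List Char)
  | (out, cur), part =>
    if pvTrailTildas cur % 2 = 1 then (out, cur.dropLast ++ '.' :: part)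
    else (out ++ [(String.ofList cur, false)], part)

def get_raw_tokens_py_alt (key : String) : List (String × Bool) :=
  match pvSplitDot key.toList with
  | [] => [("", true)]   -- unreachable: split('.') never returns an empty list
  | h :: t =>
    let r := t.foldl pvBStep ([], h)
    r.1 ++ [(String.ofList r.2, true)]

-- ===== PRECONDITION & SPEC =====
-- On keys with an escaped dot immediately followed by another dot (a maximal run of '~' of odd
-- length right before ".."), A's index skips the second dot after deleting a tilde and returns it
-- literally inside a merged token, while B treats it as the separator the escaping syntax intends.
def D_get_raw_tokens_py (key : String) : Prop :=
  ∃ i, i + 1 < key.toList.length ∧ key.toList.getD i ' ' = '.' ∧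
    key.toList.getD (i + 1) ' ' = '.' ∧
    ∃ k, k < i + 1 ∧ k % 2 = 1 ∧
      (∀ t, t < i → i - k ≤ t → key.toList.getD t ' ' = '~') ∧
      (i - k = 0 ∨ key.toList.getD (i - k - 1) ' ' ≠ '~')

-- one-pass checker used ONLY by the Decidable instance below (par = "the maximal '~'-run
-- immediately before the current position has odd length"); it only inspects the input
def pvDChk : List Char → Bool → Bool
  | [], _ => false
  | c :: rest, par =>
    (c == '.' && par && (rest.getD 0 ' ' == '.')) || pvDChk rest (c == '~' && !par)

instance (key : String) : Decidable (D_get_raw_tokens_py key) := by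
  apply decidable_of_iff (pvDChk key.toList false = true)
  unfold D_get_raw_tokens_py
  -- the bridge proofs are inlined here because the layout keeps named lemmas below the claim block
  have hsucc : ∀ (L : List Char) (i : Nat), pvCountTildas L (i + 1)
      = if L.getD i ' ' = '~' then pvCountTildas L i + 1 else 0 := by
    intro L i
    rw [pvCountTildas]
    by_cases h : L.getD i ' ' = '~'
    · rw [if_neg (not_not_intro h), if_pos h]
    · rw [if_pos h, if_neg h]
  have hrun : ∀ i, pvCountTildas key.toList i ≤ i ∧
      (∀ t, t < i → i - pvCountTildas key.toList i ≤ t → key.toList.getD t ' ' = '~') ∧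
      (i - pvCountTildas key.toList i = 0 ∨
        key.toList.getD (i - pvCountTildas key.toList i - 1) ' ' ≠ '~') := by
    intro i
    induction i with
    | zero => simp [pvCountTildas]
    | succ i ih =>
      obtain ⟨h1, h2, h3⟩ := ih
      by_cases h : key.toList.getD i ' ' = '~'
      · rw [hsucc key.toList i, if_pos h]
        refine ⟨by omega, ?_, ?_⟩
        · intro t ht1 ht2
          rcases Nat.lt_or_ge t i with h' | h'
          · exact h2 t h' (by omega)
          · have he : t = i := by omega
            rw [he]; exact h
        · rcases h3 with h3 | h3
          · left; omega
          · right
            have e : i + 1 - (pvCountTildas key.toList i + 1) - 1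
                = i - pvCountTildas key.toList i - 1 := by omega
            rw [e]; exact h3
      · rw [hsucc key.toList i, if_neg h]
        refine ⟨by omega, ?_, Or.inr ?_⟩
        · intro t ht1 ht2; omega
        · have e : i + 1 - 0 - 1 = i := by omega
          rw [e]; exact h
  have huniq : ∀ i k, k ≤ i →
      (∀ t, t < i → i - k ≤ t → key.toList.getD t ' ' = '~') →
      (i - k = 0 ∨ key.toList.getD (i - k - 1) ' ' ≠ '~') →
      k = pvCountTildas key.toList i := by
    intro i k hk hall hbd
    obtain ⟨h1, h2, h3⟩ := hrun i
    rcases lt_trichotomy k (pvCountTildas key.toList i) with h | h | h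
    · exfalso
      rcases hbd with hb0 | hbne
      · omega
      · exact hbne (h2 (i - k - 1) (by omega) (by omega))
    · exact h
    · exfalso
      rcases h3 with hb0 | hbne
      · omega
      · exact hbne (hall (i - pvCountTildas key.toList i - 1) (by omega) (by omega))
  have hgetlt : ∀ j, key.toList.getD j ' ' = '.' → j < key.toList.length := by
    intro j h
    by_contra hj
    rw [List.getD_eq_getElem?_getD, List.getElem?_eq_none (by omega)] at h
    simp at h
  have hdchk : ∀ n p, key.toList.length - p ≤ n →
      (pvDChk (key.toList.drop p) (pvCountTildas key.toList p % 2 == 1) = true ↔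
        ∃ i, p ≤ i ∧ i + 1 < key.toList.length ∧ key.toList.getD i ' ' = '.' ∧
          key.toList.getD (i + 1) ' ' = '.' ∧ pvCountTildas key.toList i % 2 = 1) := by
    intro n
    induction n with
    | zero =>
      intro p hp
      constructor
      · intro h
        rw [List.drop_eq_nil_of_le (by omega)] at h
        simp [pvDChk] at h
      · rintro ⟨i, hpi, h1, -, -, -⟩
        omega
    | succ n ih =>
      intro p hp
      by_cases hpl : p < key.toList.length
      case neg =>
        constructor
        · intro h
          rw [List.drop_eq_nil_of_le (by omega)] at h
          simp [pvDChk] at h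
        · rintro ⟨i, hpi, h1, -, -, -⟩
          omega
      case pos =>
      have hdp : key.toList.drop p = key.toList.getD p ' ' :: key.toList.drop (p + 1) := by
        rw [List.drop_eq_getElem_cons hpl]
        congr 1
        simp [List.getD_eq_getElem?_getD, List.getElem?_eq_getElem hpl]
      have hhd : (key.toList.drop (p + 1)).getD 0 ' ' = key.toList.getD (p + 1) ' ' := by
        simp [List.getD_eq_getElem?_getD, List.getElem?_drop]
      have hpar : ((key.toList.getD p ' ' == '~') && !(pvCountTildas key.toList p % 2 == 1))
          = (pvCountTildas key.toList (p + 1) % 2 == 1) := by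
        by_cases h : key.toList.getD p ' ' = '~'
        · rw [hsucc key.toList p, if_pos h]
          simp only [h, beq_self_eq_true, Bool.true_and]
          rcases Nat.mod_two_eq_zero_or_one (pvCountTildas key.toList p) with h2 | h2 <;>
            simp [Nat.add_mod, h2]
        · rw [hsucc key.toList p, if_neg h]
          have hb : (key.toList.getD p ' ' == '~') = false := beq_eq_false_iff_ne.mpr h
          rw [hb, Bool.false_and]
          rfl
      rw [hdp, pvDChk, hhd, hpar]
      simp only [Bool.or_eq_true, Bool.and_eq_true, beq_iff_eq]
      rw [ih (p + 1) (by omega)]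
      constructor
      · rintro (⟨⟨hcdot, hparp⟩, hnext⟩ | ⟨i, hpi, hrest⟩)
        · exact ⟨p, le_refl p, by have := hgetlt (p + 1) hnext; omega, hcdot, hnext, hparp⟩
        · exact ⟨i, by omega, hrest⟩
      · rintro ⟨i, hpi, h1, h2, h3, h4⟩
        rcases Nat.eq_or_lt_of_le hpi with he | hlt
        · left
          rw [he]
          exact ⟨⟨h2, h4⟩, h3⟩
        · right
          exact ⟨i, by omega, h1, h2, h3, h4⟩
  have h0 := hdchk key.toList.length 0 (by omega)
  simp only [List.drop_zero] at h0
  rw [show (pvCountTildas key.toList 0 % 2 == 1) = false from rfl] at h0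
  rw [h0]
  constructor
  · rintro ⟨i, -, h1, h2, h3, h4⟩
    obtain ⟨hc1, hc2, hc3⟩ := hrun i
    exact ⟨i, h1, h2, h3, pvCountTildas key.toList i, by omega, h4, hc2, hc3⟩
  · rintro ⟨i, h1, h2, h3, k, hk1, hk2, hk3, hk4⟩
    have he := huniq i k (by omega) hk3 hk4
    exact ⟨i, by omega, h1, h2, h3, by rw [← he]; exact hk2⟩

def Spec_get_raw_tokens_py (key : String) (out : List (String × Bool)) : Prop :=
  ¬ D_get_raw_tokens_py key → out = get_raw_tokens_py_alt key
instance (key : String) (out : List (String × Bool)) : Decidable (Spec_get_raw_tokens_py key out) := by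
  unfold Spec_get_raw_tokens_py; infer_instance

def pvDiffWitness_get_raw_tokens_py : String := "a~..b"
def pvDiffWitnessOut_get_raw_tokens_py : (List (String × Bool)) × (List (String × Bool)) :=
  ([("a..b", true)], [("a.", false), ("b", true)])

-- ===== CLAIM (what is proved, stated in full; the proofs are below) =====
def Claim_unchanged_get_raw_tokens_py : Prop :=
  ∀ (key : String), Dom_get_raw_tokens_py key → Spec_get_raw_tokens_py key (get_raw_tokens_py key)
def Claim_changed_get_raw_tokens_py : Prop :=
  Dom_get_raw_tokens_py (pvDiffWitness_get_raw_tokens_py) ∧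
  D_get_raw_tokens_py (pvDiffWitness_get_raw_tokens_py) ∧
  get_raw_tokens_py (pvDiffWitness_get_raw_tokens_py) = pvDiffWitnessOut_get_raw_tokens_py.1 ∧
  get_raw_tokens_py_alt (pvDiffWitness_get_raw_tokens_py) = pvDiffWitnessOut_get_raw_tokens_py.2 ∧
  pvDiffWitnessOut_get_raw_tokens_py.1 ≠ pvDiffWitnessOut_get_raw_tokens_py.2
def Claim_exact_get_raw_tokens_py : Prop :=
  ∀ (key : String), Dom_get_raw_tokens_py key → D_get_raw_tokens_py key →
    get_raw_tokens_py key ≠ get_raw_tokens_py_alt key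

-- ===== LEMMAS AND PROOFS =====

-- the common reference scan: one pass, no skipping (B's semantics)
def pvScan : List Char → List Char → List (String × Bool)
  | [], acc => [(String.ofList acc, true)]
  | c :: rest, acc =>
    if c = '.' then
      if pvTrailTildas acc % 2 = 1 then pvScan rest (acc.dropLast ++ ['.'])
      else (String.ofList acc, false) :: pvScan rest []
    else pvScan rest (acc ++ [c])

def pvFoldRun : List Char → List (List Char) → List (String × Bool)
  | cur, [] => [(String.ofList cur, true)]
  | cur, p :: ps =>
    if pvTrailTildas cur % 2 = 1 then pvFoldRun (cur.dropLast ++ '.' :: p) ps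
    else (String.ofList cur, false) :: pvFoldRun p ps

theorem pv_foldl_bstep (ps : List (List Char)) (out : List (String × Bool)) (cur : List Char) :
    (ps.foldl pvBStep (out, cur)).1 ++ [(String.ofList (ps.foldl pvBStep (out, cur)).2, true)]
      = out ++ pvFoldRun cur ps := by
  induction ps generalizing out cur with
  | nil => simp [pvFoldRun]
  | cons p ps ih =>
    simp only [List.foldl_cons, pvBStep, pvFoldRun]
    by_cases hp : pvTrailTildas cur % 2 = 1
    · simp [hp, ih]
    · simp [hp, ih]

theorem pvSplitDot_ne_nil (l : List Char) : pvSplitDot l ≠ [] := by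
  cases l with
  | nil => simp [pvSplitDot]
  | cons c rest =>
    simp only [pvSplitDot]
    split
    · simp
    · rcases h : pvSplitDot rest with _ | ⟨hh, t⟩ <;> simp

theorem pv_scan_split (l : List Char) (acc : List Char) :
    pvScan l acc = match pvSplitDot l with
      | [] => [(String.ofList acc, true)]
      | h :: t => pvFoldRun (acc ++ h) t := by
  induction l generalizing acc with
  | nil => simp [pvSplitDot, pvScan, pvFoldRun]
  | cons c rest ih =>
    by_cases hc : c = '.'
    · subst hc
      rcases h : pvSplitDot rest with _ | ⟨hh, t⟩
      · cases pvSplitDot_ne_nil rest h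
      · simp only [pvSplitDot, reduceIte, pvScan]
        by_cases hp : pvTrailTildas acc % 2 = 1
        · simp [hp, ih, h]
          rw [pvFoldRun]; simp [hp]
        · simp [hp, ih, h]
          rw [pvFoldRun]; simp [hp]
    · rcases h : pvSplitDot rest with _ | ⟨hh, t⟩
      · cases pvSplitDot_ne_nil rest h
      · simp only [pvSplitDot, if_neg hc, pvScan, h, ih]
        simp

theorem pv_alt_eq_scan (key : String) :
    get_raw_tokens_py_alt key = pvScan key.toList [] := by
  unfold get_raw_tokens_py_alt
  rcases h : pvSplitDot key.toList with _ | ⟨hh, t⟩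
  · cases pvSplitDot_ne_nil key.toList h
  · rw [pv_scan_split, h]
    have := pv_foldl_bstep t [] hh
    simpa using this

-- no escaped-dot-followed-by-dot pattern at positions ≥ start
def pvNoDD (l : List Char) (start : Nat) : Prop :=
  ∀ i, start ≤ i → i + 1 < l.length → l.getD i ' ' = '.' → l.getD (i + 1) ' ' = '.' →
    pvTrailTildas (l.take i) % 2 ≠ 1

theorem pv_trail_append (x : List Char) (c : Char) :
    pvTrailTildas (x ++ [c]) = if c = '~' then pvTrailTildas x + 1 else 0 := by
  by_cases hc : c = '~' <;> simp [pvTrailTildas, hc]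

theorem pvCountTildas_succ (l : List Char) (i : Nat) :
    pvCountTildas l (i + 1) = if l.getD i ' ' = '~' then pvCountTildas l i + 1 else 0 := by
  rw [pvCountTildas]
  by_cases h : l.getD i ' ' = '~'
  · rw [if_neg (not_not_intro h), if_pos h]
  · rw [if_pos h, if_neg h]

theorem pv_take_succ (l : List Char) (n : Nat) (h : n < l.length) :
    l.take (n + 1) = l.take n ++ [l.getD n ' '] := by
  rw [List.take_add_one, List.getElem?_eq_getElem h]
  simp [List.getD_eq_getElem?_getD, List.getElem?_eq_getElem h]

theorem pv_getD_drop (l : List Char) (m n : Nat) :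
    (l.drop m).getD n ' ' = l.getD (m + n) ' ' := by
  simp [List.getD_eq_getElem?_getD, List.getElem?_drop]

theorem pv_count_eq_trail (l : List Char) (prev : Nat)
    (hb : prev = 0 ∨ l.getD (prev - 1) ' ' = '.') :
    ∀ i, prev ≤ i → i ≤ l.length →
      pvCountTildas l i = pvTrailTildas ((l.drop prev).take (i - prev)) := by
  intro i hp
  induction i, hp using Nat.le_induction with
  | base =>
    intro _
    rw [Nat.sub_self]
    cases hprev : prev with
    | zero => simp [pvCountTildas, pvTrailTildas]
    | succ p =>
      have hdot : l.getD p ' ' = '.' := by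
        rcases hb with h | h
        · exfalso; omega
        · simpa [hprev] using h
      rw [pvCountTildas_succ, if_neg (by rw [hdot]; simp)]
      simp [pvTrailTildas]
  | succ i hpi ih =>
    intro hlen
    have h1 : i + 1 - prev = (i - prev) + 1 := by omega
    have h2 : i - prev < (l.drop prev).length := by
      simp only [List.length_drop]; omega
    have h3 : prev + (i - prev) = i := by omega
    rw [h1, pv_take_succ _ _ h2, pv_getD_drop, pv_trail_append, h3, pvCountTildas_succ]
    by_cases ht : l.getD i ' ' = '~'
    · rw [if_pos ht, if_pos ht, ih (by omega)]
    · rw [if_neg ht, if_neg ht]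

theorem pv_count_pos (l : List Char) (i : Nat) (h : pvCountTildas l i ≠ 0) :
    1 ≤ i ∧ l.getD (i - 1) ' ' = '~' := by
  cases i with
  | zero => simp [pvCountTildas] at h
  | succ n =>
    refine ⟨by omega, ?_⟩
    by_contra hne
    simp only [Nat.add_sub_cancel] at hne
    rw [pvCountTildas_succ, if_neg hne] at h
    exact h rfl

theorem pv_count_run (l : List Char) : ∀ i, pvCountTildas l i ≤ i ∧
    (∀ t, t < i → i - pvCountTildas l i ≤ t → l.getD t ' ' = '~') ∧
    (i - pvCountTildas l i = 0 ∨ l.getD (i - pvCountTildas l i - 1) ' ' ≠ '~') := by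
  intro i
  induction i with
  | zero => simp [pvCountTildas]
  | succ i ih =>
    obtain ⟨h1, h2, h3⟩ := ih
    by_cases h : l.getD i ' ' = '~'
    · rw [pvCountTildas_succ, if_pos h]
      refine ⟨by omega, ?_, ?_⟩
      · intro t ht1 ht2
        rcases Nat.lt_or_ge t i with h' | h'
        · exact h2 t h' (by omega)
        · have he : t = i := by omega
          rw [he]; exact h
      · rcases h3 with h3 | h3
        · left; omega
        · right
          have e : i + 1 - (pvCountTildas l i + 1) - 1 = i - pvCountTildas l i - 1 := by omega
          rw [e]; exact h3
    · rw [pvCountTildas_succ, if_neg h]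
      refine ⟨by omega, ?_, Or.inr ?_⟩
      · intro t ht1 ht2; omega
      · have e : i + 1 - 0 - 1 = i := by omega
        rw [e]; exact h

theorem pv_del_getD_ge (l : List Char) (idx j : Nat) (h1 : 1 ≤ idx) (h2 : idx ≤ l.length)
    (hj : idx - 1 ≤ j) :
    (l.take (idx - 1) ++ l.drop idx).getD j ' ' = l.getD (j + 1) ' ' := by
  have hx : (l.take (idx - 1)).length ≤ j := by
    simp only [List.length_take]; omega
  simp only [List.getD_eq_getElem?_getD, List.getElem?_append_right hx, List.getElem?_drop]
  have he : idx + (j - (l.take (idx - 1)).length) = j + 1 := by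
    simp only [List.length_take]; omega
  rw [he]

theorem pv_del_getD_lt (l : List Char) (idx j : Nat) (h2 : idx ≤ l.length)
    (hj : j < idx - 1) :
    (l.take (idx - 1) ++ l.drop idx).getD j ' ' = l.getD j ' ' := by
  have hx : j < (l.take (idx - 1)).length := by
    simp only [List.length_take]; omega
  simp only [List.getD_eq_getElem?_getD, List.getElem?_append_left hx,
    List.getElem?_take_of_lt (by omega : j < idx - 1)]

theorem pv_drop_cons (l : List Char) (i : Nat) (h : i < l.length) :
    l.drop i = l.getD i ' ' :: l.drop (i + 1) := by
  rw [List.drop_eq_getElem_cons h]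
  congr 1
  simp [List.getD_eq_getElem?_getD, List.getElem?_eq_getElem h]

theorem pv_del_trail (l : List Char) (idx : Nat) (h1 : 1 ≤ idx) (h2 : idx < l.length)
    (hdot : l.getD idx ' ' = '.') :
    ∀ j, idx ≤ j →
      pvTrailTildas ((l.take (idx - 1) ++ l.drop idx).take j)
        = pvTrailTildas (l.take (j + 1)) := by
  intro j hj
  induction j, hj using Nat.le_induction with
  | base =>
    have hd1 : (l.drop idx).take 1 = ['.'] := by
      rw [pv_drop_cons l idx h2, List.take_succ_cons, List.take_zero, hdot]
    have e1 : (l.take (idx - 1) ++ l.drop idx).take idx = l.take (idx - 1) ++ ['.'] := by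
      rw [List.take_append, List.take_of_length_le (by simp only [List.length_take]; omega)]
      have h3 : idx - (l.take (idx - 1)).length = 1 := by
        simp only [List.length_take]; omega
      rw [h3, hd1]
    have e2 : l.take (idx + 1) = l.take idx ++ ['.'] := by
      rw [pv_take_succ l idx h2, hdot]
    rw [e1, e2, pv_trail_append, pv_trail_append]
    simp
  | succ j hij ih =>
    by_cases hjl : j < l.length - 1
    · have hjl' : j < (l.take (idx - 1) ++ l.drop idx).length := by
        simp only [List.length_append, List.length_take, List.length_drop]; omega
      rw [pv_take_succ _ j hjl', pv_del_getD_ge l idx j h1 (by omega) (by omega),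
          pv_take_succ l (j + 1) (by omega), pv_trail_append, pv_trail_append, ih]
    · have hx1 : (l.take (idx - 1) ++ l.drop idx).length ≤ j + 1 := by
        simp only [List.length_append, List.length_take, List.length_drop]; omega
      have hx2 : (l.take (idx - 1) ++ l.drop idx).length ≤ j := by
        simp only [List.length_append, List.length_take, List.length_drop]; omega
      have g1 : (l.take (idx - 1) ++ l.drop idx).take (j + 1)
          = (l.take (idx - 1) ++ l.drop idx).take j := by
        rw [List.take_of_length_le hx1, List.take_of_length_le hx2]
      have g2 : l.take (j + 1 + 1) = l.take (j + 1) := by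
        rw [List.take_of_length_le (by omega : l.length ≤ j + 1 + 1),
            List.take_of_length_le (by omega : l.length ≤ j + 1)]
      rw [g1, g2, ih]

theorem pv_del_noDD (l : List Char) (idx : Nat) (h1 : 1 ≤ idx) (h2 : idx < l.length)
    (hdot : l.getD idx ' ' = '.') (hn : pvNoDD l idx) :
    pvNoDD (l.take (idx - 1) ++ l.drop idx) (idx + 1) := by
  intro j hj hlen hdj hdj1
  have hL : (l.take (idx - 1) ++ l.drop idx).length = l.length - 1 := by
    simp only [List.length_append, List.length_take, List.length_drop]; omega
  rw [hL] at hlen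
  rw [pv_del_getD_ge l idx j h1 (by omega) (by omega)] at hdj
  rw [pv_del_getD_ge l idx (j + 1) h1 (by omega) (by omega)] at hdj1
  rw [pv_del_trail l idx h1 h2 hdot j (by omega)]
  exact hn (j + 1) (by omega) (by omega) hdj hdj1

theorem pv_noDD_mono (l : List Char) (a b : Nat) (h : a ≤ b) (hn : pvNoDD l a) : pvNoDD l b :=
  fun i hi => hn i (by omega)

theorem pv_exit (fuel : Nat) (l : List Char) (prev idx : Nat) (hf : 0 < fuel)
    (h : l.length ≤ idx) (hp : prev ≤ idx) :
    pvALoop fuel l prev idx = pvScan (l.drop idx) ((l.drop prev).take (idx - prev)) := by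
  cases fuel with
  | zero => omega
  | succ fuel =>
    rw [pvALoop, if_neg (by omega), List.drop_eq_nil_of_le h,
        List.take_of_length_le (by simp only [List.length_drop]; omega)]
    simp [pvScan]

theorem pv_main (fuel : Nat) : ∀ (l : List Char) (prev idx : Nat), l.length - idx < fuel →
    prev ≤ idx → (prev = 0 ∨ l.getD (prev - 1) ' ' = '.') → pvNoDD l idx →
    pvALoop fuel l prev idx = pvScan (l.drop idx) ((l.drop prev).take (idx - prev)) := by
  induction fuel with
  | zero =>
    intro l prev idx hm hp hb hn
    omega
  | succ n ih =>
    intro l prev idx hm hp hb hn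
    by_cases hidx : idx < l.length
    case neg => exact pv_exit (n + 1) l prev idx (by omega) (by omega) hp
    case pos =>
    have hdrop : l.drop idx = l.getD idx ' ' :: l.drop (idx + 1) := pv_drop_cons l idx hidx
    have hacc : (l.drop prev).take (idx + 1 - prev)
        = (l.drop prev).take (idx - prev) ++ [l.getD idx ' '] := by
      have h1 : idx + 1 - prev = (idx - prev) + 1 := by omega
      have h4 : prev + (idx - prev) = idx := by omega
      rw [h1, pv_take_succ _ _ (by simp only [List.length_drop]; omega), pv_getD_drop, h4]
    by_cases hc : l.getD idx ' ' = '.'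
    case neg =>
      have hA : pvALoop (n + 1) l prev idx = pvALoop n l prev (idx + 1) := by
        rw [pvALoop, if_pos hidx, if_neg hc]
      have hS : pvScan (l.drop idx) ((l.drop prev).take (idx - prev))
          = pvScan (l.drop (idx + 1)) ((l.drop prev).take (idx - prev) ++ [l.getD idx ' ']) := by
        rw [hdrop]
        simp only [pvScan]
        rw [if_neg hc]
      rw [hA, hS, ← hacc]
      exact ih l prev (idx + 1) (by omega) (by omega) hb
        (pv_noDD_mono l idx (idx + 1) (by omega) hn)
    case pos =>
      have hct := pv_count_eq_trail l prev hb idx hp (le_of_lt hidx)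
      by_cases hesc : pvTrailTildas ((l.drop prev).take (idx - prev)) % 2 = 1
      case neg =>
        have hescA : pvIsEscaped l idx = false := by
          simp only [pvIsEscaped, hct]
          simpa using hesc
        have hA : pvALoop (n + 1) l prev idx
            = (String.ofList ((l.drop prev).take (idx - prev)), false)
              :: pvALoop n l (idx + 1) (idx + 1) := by
          rw [pvALoop, if_pos hidx, if_pos hc, if_pos hescA]
        have hS : pvScan (l.drop idx) ((l.drop prev).take (idx - prev))
            = (String.ofList ((l.drop prev).take (idx - prev)), false)
              :: pvScan (l.drop (idx + 1)) [] := by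
          rw [hdrop]
          simp only [pvScan]
          rw [if_pos hc, if_neg hesc]
        rw [hA, hS]
        congr 1
        have := ih l (idx + 1) (idx + 1) (by omega) (le_refl _)
          (Or.inr (by simpa using hc))
          (pv_noDD_mono l idx (idx + 1) (by omega) hn)
        simpa using this
      case pos =>
        have hcnt_ne : pvCountTildas l idx ≠ 0 := by rw [hct]; omega
        obtain ⟨hi1, htil⟩ := pv_count_pos l idx hcnt_ne
        have hprevlt : prev < idx := by
          rcases Nat.lt_or_ge prev idx with h | h
          · exact h
          · exfalso
            have hpe : prev = idx := by omega
            rw [hpe, Nat.sub_self] at hesc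
            simp [pvTrailTildas] at hesc
        have hescA : pvIsEscaped l idx = true := by
          simp only [pvIsEscaped, hct]
          simpa using hesc
        have hA : pvALoop (n + 1) l prev idx
            = pvALoop n (l.take (idx - 1) ++ l.drop idx) prev (idx + 1) := by
          rw [pvALoop, if_pos hidx, if_pos hc, if_neg (by simp [hescA])]
        have hS1 : pvScan (l.drop idx) ((l.drop prev).take (idx - prev))
            = pvScan (l.drop (idx + 1))
                (((l.drop prev).take (idx - prev)).dropLast ++ ['.']) := by
          rw [hdrop]
          simp only [pvScan]
          rw [if_pos hc, if_pos hesc]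
        have hdl : ((l.drop prev).take (idx - prev)).dropLast
            = (l.drop prev).take (idx - 1 - prev) := by
          rw [List.dropLast_eq_take, List.take_take]
          congr 1
          simp only [List.length_take, List.length_drop]
          omega
        by_cases hlast : idx + 1 < l.length
        case neg =>
          have hA2 : pvALoop n (l.take (idx - 1) ++ l.drop idx) prev (idx + 1)
              = [(String.ofList ((l.take (idx - 1) ++ l.drop idx).drop prev), true)] := by
            rw [pv_exit n _ prev (idx + 1) (by omega) (by
                  simp only [List.length_append, List.length_take, List.length_drop]; omega)
                (by omega),
              List.drop_eq_nil_of_le (by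
                  simp only [List.length_append, List.length_take, List.length_drop]; omega),
              List.take_of_length_le (by
                  simp only [List.length_drop, List.length_append, List.length_take]; omega)]
            simp [pvScan]
          have hrest : l.drop (idx + 1) = [] := List.drop_eq_nil_of_le (by omega)
          have hdropidx : l.drop idx = ['.'] := by
            rw [hdrop, hrest, hc]
          have hfin : (l.take (idx - 1) ++ l.drop idx).drop prev
              = ((l.drop prev).take (idx - prev)).dropLast ++ ['.'] := by
            rw [List.drop_append, List.drop_take, hdropidx, hdl]
            congr 1
            have hz : prev - (l.take (idx - 1)).length = 0 := by
              simp only [List.length_take]; omega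
            rw [hz, List.drop_zero]
          rw [hA, hA2, hS1, hrest]
          simp only [pvScan]
          rw [hfin]
        case pos =>
          have hd2 : l.getD (idx + 1) ' ' ≠ '.' := by
            intro hdd
            have h0 := pv_count_eq_trail l 0 (Or.inl rfl) idx (by omega) (by omega)
            simp only [List.drop_zero, Nat.sub_zero] at h0
            exact hn idx (le_refl _) hlast hc hdd (by rw [← h0, hct]; exact hesc)
          have hmain := ih (l.take (idx - 1) ++ l.drop idx) prev (idx + 1)
            (by simp only [List.length_append, List.length_take, List.length_drop]; omega)
            (by omega)
            (by rcases hb with h | h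
                · exact Or.inl h
                · refine Or.inr ?_
                  have hne : prev - 1 ≠ idx - 1 := by
                    intro he
                    rw [← he] at htil
                    rw [htil] at h
                    simp at h
                  rw [pv_del_getD_lt l idx (prev - 1) (by omega) (by omega)]
                  exact h)
            (pv_del_noDD l idx hi1 hidx hc hn)
          have e1 : (l.take (idx - 1) ++ l.drop idx).drop (idx + 1) = l.drop (idx + 2) := by
            rw [List.drop_append, List.drop_eq_nil_of_le (by
                  simp only [List.length_take]; omega), List.nil_append, List.drop_drop]
            congr 1
            simp only [List.length_take]; omega
          have hdd2 : (l.drop idx).take 2 = ['.', l.getD (idx + 1) ' '] := by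
            have ht2 : (l.drop idx).take 2 = (l.drop idx).take 1 ++ [(l.drop idx).getD 1 ' '] :=
              pv_take_succ _ 1 (by simp only [List.length_drop]; omega)
            rw [ht2, pv_getD_drop, pv_drop_cons l idx hidx, List.take_succ_cons,
                List.take_zero, hc]
            rfl
          have e2 : ((l.take (idx - 1) ++ l.drop idx).drop prev).take (idx + 1 - prev)
              = ((l.drop prev).take (idx - prev)).dropLast ++ ['.', l.getD (idx + 1) ' '] := by
            rw [List.drop_append, List.drop_take, hdl]
            have hz : prev - (l.take (idx - 1)).length = 0 := by
              simp only [List.length_take]; omega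
            rw [hz, List.drop_zero, List.take_append, List.take_take]
            congr 1
            · congr 1; omega
            · have h2len : idx + 1 - prev - ((l.drop prev).take (idx - 1 - prev)).length = 2 := by
                simp only [List.length_take, List.length_drop]; omega
              rw [h2len, hdd2]
          have hdrop2 : l.drop (idx + 1) = l.getD (idx + 1) ' ' :: l.drop (idx + 2) :=
            pv_drop_cons l (idx + 1) hlast
          have hS2 : pvScan (l.drop (idx + 1))
                (((l.drop prev).take (idx - prev)).dropLast ++ ['.'])
              = pvScan (l.drop (idx + 2))
                  (((l.drop prev).take (idx - prev)).dropLast ++ ['.', l.getD (idx + 1) ' ']) := by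
            rw [hdrop2]
            simp only [pvScan]
            rw [if_neg hd2]
            congr 1
            simp
          rw [hA, hS1, hS2, hmain, e1, e2]

-- named twin of the uniqueness fact inlined in the Decidable instance of D_
theorem pv_count_unique (l : List Char) (i k : Nat) (hk : k ≤ i)
    (hall : ∀ t, t < i → i - k ≤ t → l.getD t ' ' = '~')
    (hbd : i - k = 0 ∨ l.getD (i - k - 1) ' ' ≠ '~') :
    k = pvCountTildas l i := by
  obtain ⟨h1, h2, h3⟩ := pv_count_run l i
  rcases lt_trichotomy k (pvCountTildas l i) with h | h | h
  · exfalso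
    rcases hbd with hb0 | hbne
    · omega
    · exact hbne (h2 (i - k - 1) (by omega) (by omega))
  · exact h
  · exfalso
    rcases h3 with hb0 | hbne
    · omega
    · exact hbne (hall (i - pvCountTildas l i - 1) (by omega) (by omega))

-- the escaped-dot-followed-by-dot pattern, in the trailing-tilde form used by the proofs
def pvPat (l : List Char) (i : Nat) : Prop :=
  i + 1 < l.length ∧ l.getD i ' ' = '.' ∧ l.getD (i + 1) ' ' = '.' ∧
    pvTrailTildas (l.take i) % 2 = 1

theorem pv_pat_del (l : List Char) (idx j : Nat) (h1 : 1 ≤ idx) (h2 : idx < l.length)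
    (hdot : l.getD idx ' ' = '.') (hj : idx ≤ j) :
    pvPat (l.take (idx - 1) ++ l.drop idx) j ↔ pvPat l (j + 1) := by
  unfold pvPat
  rw [pv_del_getD_ge l idx j h1 (by omega) (by omega),
      pv_del_getD_ge l idx (j + 1) h1 (by omega) (by omega),
      pv_del_trail l idx h1 h2 hdot j (by omega)]
  have hL : (l.take (idx - 1) ++ l.drop idx).length = l.length - 1 := by
    simp only [List.length_append, List.length_take, List.length_drop]; omega
  rw [hL]
  constructor
  · rintro ⟨ha, hb, hc', hd⟩; exact ⟨by omega, hb, hc', hd⟩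
  · rintro ⟨ha, hb, hc', hd⟩; exact ⟨by omega, hb, hc', hd⟩

-- the length of a scan depends on the accumulator only through its trailing-tilde parity
theorem pv_scan_len_congr : ∀ (rest a1 a2 : List Char),
    pvTrailTildas a1 % 2 = pvTrailTildas a2 % 2 →
    (pvScan rest a1).length = (pvScan rest a2).length := by
  intro rest
  induction rest with
  | nil => intro a1 a2 _; simp [pvScan]
  | cons c r ih =>
    intro a1 a2 h
    by_cases hc : c = '.'
    · subst hc
      simp only [pvScan, reduceIte]
      by_cases h1 : pvTrailTildas a1 % 2 = 1
      · rw [if_pos h1, if_pos (by omega)]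
        exact ih _ _ (by rw [pv_trail_append, pv_trail_append]; simp)
      · rw [if_neg h1, if_neg (by omega)]
        simp only [List.length_cons]
    · simp only [pvScan, if_neg hc]
      apply ih
      rw [pv_trail_append, pv_trail_append]
      by_cases h2 : c = '~'
      · simp only [h2, reduceIte]
        omega
      · simp only [h2, reduceIte]

-- A's token list is never longer than B's, and strictly shorter as soon as the
-- remaining input contains the escaped-dot-followed-by-dot pattern
theorem pv_len (fuel : Nat) : ∀ (l : List Char) (prev idx : Nat), l.length - idx < fuel →
    prev ≤ idx → (prev = 0 ∨ l.getD (prev - 1) ' ' = '.') →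
    (pvALoop fuel l prev idx).length
        ≤ (pvScan (l.drop idx) ((l.drop prev).take (idx - prev))).length ∧
    ((∃ i, idx ≤ i ∧ pvPat l i) →
      (pvALoop fuel l prev idx).length
        < (pvScan (l.drop idx) ((l.drop prev).take (idx - prev))).length) := by
  induction fuel with
  | zero => intro l prev idx hm; omega
  | succ n ih =>
    intro l prev idx hm hp hb
    by_cases hidx : idx < l.length
    case neg =>
      rw [pv_exit (n + 1) l prev idx (by omega) (by omega) hp]
      refine ⟨le_refl _, ?_⟩
      rintro ⟨i, hi, h1, -, -, -⟩
      omega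
    case pos =>
    have hdrop : l.drop idx = l.getD idx ' ' :: l.drop (idx + 1) := pv_drop_cons l idx hidx
    have hacc : (l.drop prev).take (idx + 1 - prev)
        = (l.drop prev).take (idx - prev) ++ [l.getD idx ' '] := by
      have h1 : idx + 1 - prev = (idx - prev) + 1 := by omega
      have h4 : prev + (idx - prev) = idx := by omega
      rw [h1, pv_take_succ _ _ (by simp only [List.length_drop]; omega), pv_getD_drop, h4]
    by_cases hc : l.getD idx ' ' = '.'
    case neg =>
      have hA : pvALoop (n + 1) l prev idx = pvALoop n l prev (idx + 1) := by
        rw [pvALoop, if_pos hidx, if_neg hc]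
      have hS : pvScan (l.drop idx) ((l.drop prev).take (idx - prev))
          = pvScan (l.drop (idx + 1)) ((l.drop prev).take (idx + 1 - prev)) := by
        rw [hdrop]
        simp only [pvScan]
        rw [if_neg hc, ← hacc]
      have hih := ih l prev (idx + 1) (by omega) (by omega) hb
      rw [hA, hS]
      refine ⟨hih.1, ?_⟩
      rintro ⟨i, hi, hpat⟩
      apply hih.2
      refine ⟨i, ?_, hpat⟩
      rcases Nat.eq_or_lt_of_le hi with he | hlt
      · exfalso; rw [← he] at hpat; exact hc hpat.2.1
      · omega
    case pos =>
      have hct := pv_count_eq_trail l prev hb idx hp (le_of_lt hidx)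
      have hct0 := pv_count_eq_trail l 0 (Or.inl rfl) idx (by omega) (by omega)
      simp only [List.drop_zero, Nat.sub_zero] at hct0
      by_cases hesc : pvTrailTildas ((l.drop prev).take (idx - prev)) % 2 = 1
      case neg =>
        have hescA : pvIsEscaped l idx = false := by
          simp only [pvIsEscaped, hct]
          simpa using hesc
        have hA : pvALoop (n + 1) l prev idx
            = (String.ofList ((l.drop prev).take (idx - prev)), false)
              :: pvALoop n l (idx + 1) (idx + 1) := by
          rw [pvALoop, if_pos hidx, if_pos hc, if_pos hescA]
        have hS : pvScan (l.drop idx) ((l.drop prev).take (idx - prev))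
            = (String.ofList ((l.drop prev).take (idx - prev)), false)
              :: pvScan (l.drop (idx + 1)) [] := by
          rw [hdrop]
          simp only [pvScan]
          rw [if_pos hc, if_neg hesc]
        have hih := ih l (idx + 1) (idx + 1) (by omega) (le_refl _)
          (Or.inr (by simpa using hc))
        simp only [Nat.sub_self, List.take_zero] at hih
        rw [hA, hS]
        simp only [List.length_cons]
        refine ⟨by omega, ?_⟩
        rintro ⟨i, hi, hpat⟩
        have hstrict : (∃ i, idx + 1 ≤ i ∧ pvPat l i) := by
          refine ⟨i, ?_, hpat⟩
          rcases Nat.eq_or_lt_of_le hi with he | hlt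
          · exfalso
            rw [← he] at hpat
            have := hpat.2.2.2
            rw [← hct0, hct] at this
            omega
          · omega
        have := hih.2 hstrict
        omega
      case pos =>
        have hcnt_ne : pvCountTildas l idx ≠ 0 := by rw [hct]; omega
        obtain ⟨hi1, htil⟩ := pv_count_pos l idx hcnt_ne
        have hprevlt : prev < idx := by
          rcases Nat.lt_or_ge prev idx with h | h
          · exact h
          · exfalso
            have hpe : prev = idx := by omega
            rw [hpe, Nat.sub_self] at hesc
            simp [pvTrailTildas] at hesc
        have hescA : pvIsEscaped l idx = true := by
          simp only [pvIsEscaped, hct]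
          simpa using hesc
        have hA : pvALoop (n + 1) l prev idx
            = pvALoop n (l.take (idx - 1) ++ l.drop idx) prev (idx + 1) := by
          rw [pvALoop, if_pos hidx, if_pos hc, if_neg (by simp [hescA])]
        have hS1 : pvScan (l.drop idx) ((l.drop prev).take (idx - prev))
            = pvScan (l.drop (idx + 1))
                (((l.drop prev).take (idx - prev)).dropLast ++ ['.']) := by
          rw [hdrop]
          simp only [pvScan]
          rw [if_pos hc, if_pos hesc]
        have hdl : ((l.drop prev).take (idx - prev)).dropLast
            = (l.drop prev).take (idx - 1 - prev) := by
          rw [List.dropLast_eq_take, List.take_take]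
          congr 1
          simp only [List.length_take, List.length_drop]
          omega
        have hb' : prev = 0 ∨ (l.take (idx - 1) ++ l.drop idx).getD (prev - 1) ' ' = '.' := by
          rcases hb with h | h
          · exact Or.inl h
          · refine Or.inr ?_
            have hne : prev - 1 ≠ idx - 1 := by
              intro he
              rw [← he] at htil
              rw [htil] at h
              simp at h
            rw [pv_del_getD_lt l idx (prev - 1) (by omega) (by omega)]
            exact h
        have hih := ih (l.take (idx - 1) ++ l.drop idx) prev (idx + 1)
          (by simp only [List.length_append, List.length_take, List.length_drop]; omega)
          (by omega) hb'
        by_cases hlast : idx + 1 < l.length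
        case neg =>
          have hA2 : pvALoop n (l.take (idx - 1) ++ l.drop idx) prev (idx + 1)
              = [(String.ofList ((l.take (idx - 1) ++ l.drop idx).drop prev), true)] := by
            rw [pv_exit n _ prev (idx + 1) (by omega) (by
                  simp only [List.length_append, List.length_take, List.length_drop]; omega)
                (by omega),
              List.drop_eq_nil_of_le (by
                  simp only [List.length_append, List.length_take, List.length_drop]; omega),
              List.take_of_length_le (by
                  simp only [List.length_drop, List.length_append, List.length_take]; omega)]
            simp [pvScan]
          have hrest : l.drop (idx + 1) = [] := List.drop_eq_nil_of_le (by omega)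
          rw [hA, hA2, hS1, hrest]
          simp only [pvScan, List.length_cons]
          refine ⟨by simp, ?_⟩
          rintro ⟨i, hi, h1, -, -, -⟩
          omega
        case pos =>
          have e1 : (l.take (idx - 1) ++ l.drop idx).drop (idx + 1) = l.drop (idx + 2) := by
            rw [List.drop_append, List.drop_eq_nil_of_le (by
                  simp only [List.length_take]; omega), List.nil_append, List.drop_drop]
            congr 1
            simp only [List.length_take]; omega
          have hdd2 : (l.drop idx).take 2 = ['.', l.getD (idx + 1) ' '] := by
            have ht2 : (l.drop idx).take 2 = (l.drop idx).take 1 ++ [(l.drop idx).getD 1 ' '] :=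
              pv_take_succ _ 1 (by simp only [List.length_drop]; omega)
            rw [ht2, pv_getD_drop, pv_drop_cons l idx hidx, List.take_succ_cons,
                List.take_zero, hc]
            rfl
          have e2 : ((l.take (idx - 1) ++ l.drop idx).drop prev).take (idx + 1 - prev)
              = ((l.drop prev).take (idx - prev)).dropLast ++ ['.', l.getD (idx + 1) ' '] := by
            rw [List.drop_append, List.drop_take, hdl]
            have hz : prev - (l.take (idx - 1)).length = 0 := by
              simp only [List.length_take]; omega
            rw [hz, List.drop_zero, List.take_append, List.take_take]
            congr 1
            · congr 1; omega
            · have h2len : idx + 1 - prev - ((l.drop prev).take (idx - 1 - prev)).length = 2 := by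
                simp only [List.length_take, List.length_drop]; omega
              rw [h2len, hdd2]
          have hdrop2 : l.drop (idx + 1) = l.getD (idx + 1) ' ' :: l.drop (idx + 2) :=
            pv_drop_cons l (idx + 1) hlast
          rw [hA, hS1]
          rw [e1, e2] at hih
          by_cases hd2 : l.getD (idx + 1) ' ' = '.'
          case pos =>
            -- the pattern is right here: B emits a separator A never sees
            have htr0 : pvTrailTildas ((((l.drop prev).take (idx - prev)).dropLast
                ++ ['.', l.getD (idx + 1) ' '])) % 2 = pvTrailTildas ([] : List Char) % 2 := by
              rw [show (((l.drop prev).take (idx - prev)).dropLast ++ ['.', l.getD (idx + 1) ' '])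
                  = (((l.drop prev).take (idx - prev)).dropLast ++ ['.']) ++ [l.getD (idx + 1) ' ']
                  from by simp, pv_trail_append]
              rw [hd2]
              simp [pvTrailTildas]
            have hcong := pv_scan_len_congr (l.drop (idx + 2)) _ _ htr0
            have hS2 : pvScan (l.drop (idx + 1))
                  (((l.drop prev).take (idx - prev)).dropLast ++ ['.'])
                = (String.ofList (((l.drop prev).take (idx - prev)).dropLast ++ ['.']), false)
                  :: pvScan (l.drop (idx + 2)) [] := by
              rw [hdrop2, hd2]
              simp only [pvScan, reduceIte]
              rw [if_neg (by rw [pv_trail_append]; simp)]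
            rw [hS2]
            simp only [List.length_cons]
            have hfin : (pvALoop n (l.take (idx - 1) ++ l.drop idx) prev (idx + 1)).length
                ≤ (pvScan (l.drop (idx + 2)) ([] : List Char)).length := by
              have h1 := hih.1
              omega
            constructor
            · omega
            · intro _
              omega
          case neg =>
            have hS2 : pvScan (l.drop (idx + 1))
                  (((l.drop prev).take (idx - prev)).dropLast ++ ['.'])
                = pvScan (l.drop (idx + 2))
                    (((l.drop prev).take (idx - prev)).dropLast ++ ['.', l.getD (idx + 1) ' ']) := by
              rw [hdrop2]
              simp only [pvScan]
              rw [if_neg hd2]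
              congr 1
              simp
            rw [hS2]
            refine ⟨hih.1, ?_⟩
            rintro ⟨i, hi, hpat⟩
            apply hih.2
            have hi2 : idx + 2 ≤ i := by
              rcases Nat.eq_or_lt_of_le hi with he | hlt
              · exfalso; rw [← he] at hpat; exact hd2 hpat.2.2.1
              · rcases Nat.eq_or_lt_of_le hlt with he | hlt2
                · exfalso; rw [← he] at hpat; exact hd2 hpat.2.1
                · omega
            refine ⟨i - 1, by omega, ?_⟩
            rw [pv_pat_del l idx (i - 1) hi1 hidx hc (by omega)]
            have : i - 1 + 1 = i := by omega
            rw [this]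
            exact hpat

-- ===== VERDICT (by name: the statement is the Claim_ definition above) =====
theorem get_raw_tokens_py_spec : Claim_unchanged_get_raw_tokens_py := by
  intro key _hdom
  unfold Spec_get_raw_tokens_py
  intro hnd
  have hn : pvNoDD key.toList 0 := by
    intro i _ h1 h2 h3 h4
    apply hnd
    obtain ⟨hc1, hc2, hc3⟩ := pv_count_run key.toList i
    have hce := pv_count_eq_trail key.toList 0 (Or.inl rfl) i (by omega) (by omega)
    simp only [List.drop_zero, Nat.sub_zero] at hce
    exact ⟨i, h1, h2, h3, pvCountTildas key.toList i, by omega,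
      by rw [hce]; exact h4, hc2, hc3⟩
  have hmain := pv_main (key.toList.length + 1) key.toList 0 0 (by omega) (le_refl 0)
    (Or.inl rfl) hn
  unfold get_raw_tokens_py
  rw [pv_alt_eq_scan]
  simpa using hmain

theorem get_raw_tokens_py_changed : Claim_changed_get_raw_tokens_py := by
  unfold Claim_changed_get_raw_tokens_py
  decide

theorem get_raw_tokens_py_tight : Claim_exact_get_raw_tokens_py := by
  intro key _hdom hd heq
  obtain ⟨i, h1, h2, h3, k, hk1, hk2, hall, hbd⟩ := hd
  have hk := pv_count_unique key.toList i k (by omega) hall hbd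
  have hct0 := pv_count_eq_trail key.toList 0 (Or.inl rfl) i (by omega) (by omega)
  simp only [List.drop_zero, Nat.sub_zero] at hct0
  have hpat : pvPat key.toList i := ⟨h1, h2, h3, by rw [← hct0, ← hk]; exact hk2⟩
  have hlen := (pv_len (key.toList.length + 1) key.toList 0 0 (by omega) (le_refl 0)
    (Or.inl rfl)).2 ⟨i, by omega, hpat⟩
  simp only [Nat.sub_self, List.take_zero, List.drop_zero] at hlen
  have heq' : (pvALoop (key.toList.length + 1) key.toList 0 0).length
      = (pvScan key.toList []).length := by
    rw [show pvALoop (key.toList.length + 1) key.toList 0 0 = get_raw_tokens_py key from rfl,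
        heq, pv_alt_eq_scan]
  omega
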